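-- pv_equiv track=rewrite | github.com/ama10047/Reproducbility-Challenge-SCC23 | sbc.py | sbc_base
-- ===== SOURCE A (Python) =====
-- def sbc_base(r):
--     result = [ [None for _ in range(r)] for _ in range(r) ]
--     count = 0
--     for i in range(r):
--         for j in range(i):
--             result[i][j] = count
--             result[j][i] = count
--             count += 1
--     return result
-- ===== SOURCE B (Python) =====
-- def sbc_base(r):
--     return [[None if i == j else (max(i, j) * (max(i, j) - 1)) // 2 + min(i, j)
--              for j in range(r)]
--             for i in range(r)]
-- ===== Notes on version B (the rewrite author's own statement) =====
-- stated objective: idiomatic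
-- what changed: Replaced the mutated matrix and running counter threaded through nested loops by a nested list comprehension that computes each off-diagonal entry directly from the closed form max*(max-1)//2+min.
import Mathlib
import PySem

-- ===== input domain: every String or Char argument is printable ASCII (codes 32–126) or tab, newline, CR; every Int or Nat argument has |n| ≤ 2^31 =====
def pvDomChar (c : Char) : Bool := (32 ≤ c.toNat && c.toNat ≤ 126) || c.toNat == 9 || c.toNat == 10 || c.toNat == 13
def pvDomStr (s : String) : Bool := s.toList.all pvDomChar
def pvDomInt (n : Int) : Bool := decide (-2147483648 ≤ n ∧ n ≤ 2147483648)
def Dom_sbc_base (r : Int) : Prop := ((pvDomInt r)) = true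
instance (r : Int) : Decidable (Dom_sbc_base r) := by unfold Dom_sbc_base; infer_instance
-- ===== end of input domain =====

-- B replaces A's mutated matrix and running counter by a nested comprehension with a closed-form entry (idiomatic; same cost).

-- ===== PORT A =====
-- result[i][j] = v on a list-of-lists matrix (indices produced by range are in bounds and nonnegative, so Nat indexing is exact)
def pvMset (m : List (List (Option Int))) (i j : Nat) (v : Option Int) : List (List (Option Int)) :=
  m.set i ((m.getD i []).set j v)

def sbc_base (r : Int) : List (List (Option Int)) :=
  let n := r.toNat   -- range(r) iterates r.toNat times over 0,1,…; indices are nonnegative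
  let init : List (List (Option Int)) := List.replicate n (List.replicate n none)
  ((List.range n).foldl
    (fun st i =>
      (List.range i).foldl
        (fun st j =>
          (pvMset (pvMset st.1 i j (some st.2)) j i (some st.2), st.2 + 1)) st)
    (init, (0 : Int))).1

-- ===== PORT B =====
def sbc_base_alt (r : Int) : List (List (Option Int)) :=
  (List.range r.toNat).map fun i =>
    (List.range r.toNat).map fun j =>
      if i = j then none
      else some (((max i j * (max i j - 1)) / 2 + min i j : Nat) : Int)

-- ===== PRECONDITION & SPEC =====
def Spec_sbc_base (r : Int) (out : List (List (Option Int))) : Prop := out = sbc_base_alt r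
instance (r : Int) (out : List (List (Option Int))) : Decidable (Spec_sbc_base r out) := by unfold Spec_sbc_base; infer_instance

-- ===== CLAIM (what is proved, stated in full; the proofs are below) =====
def Claim_equal_sbc_base : Prop := ∀ (r : Int), Dom_sbc_base r → Spec_sbc_base r (sbc_base r)

-- ===== LEMMAS AND PROOFS =====

-- closed-form value at cell (a,b)
def pvF (a b : Nat) : Option Int := some (((max a b * (max a b - 1)) / 2 + min a b : Nat) : Int)

-- the n×n matrix whose (a,b) entry is F a b
def pvMat (n : Nat) (F : Nat → Nat → Option Int) : List (List (Option Int)) :=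
  (List.range n).map fun a => (List.range n).map fun b => F a b

-- entries filled after A's outer loop has finished rows < k and the inner loop of row k has done j steps
def pvG (k j : Nat) (a b : Nat) : Option Int :=
  if a ≠ b ∧ (max a b < k ∨ (max a b = k ∧ min a b < j)) then pvF a b else none

def pvTri (k : Nat) : Nat := k * (k - 1) / 2

theorem pv_set_map_range {α : Type} (n i : Nat) (x : α) (g : Nat → α) :
    ((List.range n).map g).set i x = (List.range n).map fun a => if a = i then x else g a := by
  apply List.ext_getElem
  · simp
  · intro a h1 h2
    simp only [List.getElem_set, List.getElem_map, List.getElem_range]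
    by_cases h : i = a
    · rw [if_pos h, if_pos h.symm]
    · rw [if_neg h, if_neg (fun h2 => h h2.symm)]

theorem pvMset_mat (n : Nat) (F : Nat → Nat → Option Int) (i j : Nat) (v : Option Int)
    (hi : i < n) :
    pvMset (pvMat n F) i j v = pvMat n (fun a b => if a = i ∧ b = j then v else F a b) := by
  unfold pvMset pvMat
  have hrow : ((List.range n).map fun a => (List.range n).map fun b => F a b).getD i [] =
      (List.range n).map fun b => F i b := by
    rw [List.getD_eq_getElem _ _ (by simpa using hi)]
    simp
  rw [hrow, pv_set_map_range n j v, pv_set_map_range n i]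
  refine List.map_congr_left ?_
  intro a _
  by_cases hai : a = i
  · subst hai
    rw [if_pos rfl]
    refine List.map_congr_left ?_
    intro b _
    by_cases hbj : b = j
    · subst hbj; simp
    · simp [hbj]
  · rw [if_neg hai]
    refine List.map_congr_left ?_
    intro b _
    simp [hai]

theorem pvMat_congr (n : Nat) (F F' : Nat → Nat → Option Int)
    (h : ∀ a b, a < n → b < n → F a b = F' a b) : pvMat n F = pvMat n F' := by
  unfold pvMat
  refine List.map_congr_left ?_
  intro a ha
  refine List.map_congr_left ?_
  intro b hb
  exact h a b (List.mem_range.mp ha) (List.mem_range.mp hb)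

theorem pvMat_zero (n : Nat) :
    pvMat n (pvG 0 0) = List.replicate n (List.replicate n (none : Option Int)) := by
  unfold pvMat pvG
  simp

theorem pvTri_succ (k : Nat) : pvTri (k + 1) = pvTri k + k := by
  unfold pvTri
  cases k with
  | zero => simp
  | succ m =>
    have e1 : m + 1 + 1 - 1 = m + 1 := by omega
    have e2 : m + 1 - 1 = m := by omega
    rw [e1, e2]
    have h1 : (m + 1 + 1) * (m + 1) = (m + 1) * m + 2 * (m + 1) := by ring
    omega

-- inner loop invariant
theorem pv_inner (n k : Nat) (hk : k < n) : ∀ j, j ≤ k →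
    (List.range j).foldl
      (fun st jj =>
        (pvMset (pvMset st.1 k jj (some st.2)) jj k (some st.2), st.2 + 1))
      ((pvMat n (pvG k 0), ((pvTri k : Nat) : Int)))
    = (pvMat n (pvG k j), ((pvTri k + j : Nat) : Int)) := by
  intro j
  induction j with
  | zero => simp
  | succ m ih =>
    intro hm
    have hm' : m ≤ k := Nat.le_of_succ_le hm
    have hmk : m < k := hm
    have hmn : m < n := lt_trans hmk hk
    rw [List.range_succ, List.foldl_append, ih hm']
    simp only [List.foldl_cons, List.foldl_nil]
    rw [pvMset_mat n _ k m _ hk, pvMset_mat n _ m k _ hmn]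
    simp only [Prod.mk.injEq]
    constructor
    · apply pvMat_congr
      intro a b _ _
      by_cases h1 : a = m ∧ b = k
      · obtain ⟨rfl, rfl⟩ := h1
        rw [if_pos ⟨rfl, rfl⟩]
        unfold pvG pvF
        rw [if_pos ⟨by omega, Or.inr ⟨by omega, by omega⟩⟩]
        rw [show max a b = b from by omega, show min a b = a from by omega]
        unfold pvTri
        rfl
      · rw [if_neg h1]
        by_cases h2 : a = k ∧ b = m
        · obtain ⟨rfl, rfl⟩ := h2
          rw [if_pos ⟨rfl, rfl⟩]
          unfold pvG pvF
          rw [if_pos ⟨by omega, Or.inr ⟨by omega, by omega⟩⟩]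
          rw [show max a b = a from by omega, show min a b = b from by omega]
          unfold pvTri
          rfl
        · rw [if_neg h2]
          unfold pvG
          have hiff : (a ≠ b ∧ (max a b < k ∨ max a b = k ∧ min a b < m)) ↔
                      (a ≠ b ∧ (max a b < k ∨ max a b = k ∧ min a b < m + 1)) := by omega
          rw [if_congr hiff rfl rfl]
    · push_cast; ring

-- outer loop invariant
theorem pv_outer (n : Nat) : ∀ k, k ≤ n →
    (List.range k).foldl
      (fun st i =>
        (List.range i).foldl
          (fun st j =>
            (pvMset (pvMset st.1 i j (some st.2)) j i (some st.2), st.2 + 1)) st)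
      (List.replicate n (List.replicate n (none : Option Int)), (0 : Int))
    = (pvMat n (pvG k 0), ((pvTri k : Nat) : Int)) := by
  intro k
  induction k with
  | zero => simp [pvMat_zero, pvTri]
  | succ m ih =>
    intro hm
    have hm' : m ≤ n := Nat.le_of_succ_le hm
    have hmn : m < n := hm
    rw [List.range_succ, List.foldl_append, ih hm']
    simp only [List.foldl_cons, List.foldl_nil]
    rw [pv_inner n m hmn m (le_refl m)]
    simp only [Prod.mk.injEq]
    constructor
    · apply pvMat_congr
      intro a b _ _
      unfold pvG
      have hiff : (a ≠ b ∧ (max a b < m ∨ max a b = m ∧ min a b < m)) ↔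
                  (a ≠ b ∧ (max a b < m + 1 ∨ max a b = m + 1 ∧ min a b < 0)) := by omega
      rw [if_congr hiff rfl rfl]
    · rw [pvTri_succ]

-- ===== VERDICT (by name: the statement is the Claim_ definition above) =====
theorem sbc_base_spec : Claim_equal_sbc_base := by
  intro r _
  unfold Spec_sbc_base
  simp only [sbc_base, sbc_base_alt]
  rw [pv_outer r.toNat r.toNat (le_refl _)]
  apply pvMat_congr
  intro a b ha hb
  unfold pvG pvF
  by_cases hab : a = b
  · rw [if_neg (by omega), if_pos hab]
  · rw [if_pos ⟨hab, Or.inl (by omega)⟩, if_neg hab]
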